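-- pv_equiv track=rewrite | github.com/machinereading/KV-rule | code/learn.py | is_bound
-- ===== SOURCE A (Python) =====
-- def is_bound(r):
-- 	bound = True
--
-- 	# --
--
-- 	head = r[0]
-- 	body = r[1:]
--
-- 	# --
--
-- 	x = head[1]
-- 	y = head[0]
--
-- 	# --
--
-- 	v_f = x
--
-- 	# --
--
-- 	for v_a, v_b, p, d in body:
-- 		if v_a != v_f:
-- 			bound = False
--
-- 		# --
--
-- 		v_f = v_b
--
-- 	# --
--
-- 	if v_f != y:
-- 		bound = False
--
-- 	# --
--
-- 	return bound
-- ===== SOURCE B (Python) =====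
-- def is_bound(r):
--     head, body = r[0], r[1:]
--     y = head[0]
--
--     def chained(cur, rest):
--         if not rest:
--             return cur == y
--         v_a, v_b, p, d = rest[0]
--         return v_a == cur and chained(v_b, rest[1:])
--
--     return chained(head[1], body)
-- ===== Notes on version B (the rewrite author's own statement) =====
-- stated objective: alternative
-- what changed: Replaces A's full-scan loop with a mutable mismatch flag by a short-circuiting recursive chain-follower: recursion carries the current endpoint and stops at the first broken link, with no flag and no final fix-up check.
import Mathlib
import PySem

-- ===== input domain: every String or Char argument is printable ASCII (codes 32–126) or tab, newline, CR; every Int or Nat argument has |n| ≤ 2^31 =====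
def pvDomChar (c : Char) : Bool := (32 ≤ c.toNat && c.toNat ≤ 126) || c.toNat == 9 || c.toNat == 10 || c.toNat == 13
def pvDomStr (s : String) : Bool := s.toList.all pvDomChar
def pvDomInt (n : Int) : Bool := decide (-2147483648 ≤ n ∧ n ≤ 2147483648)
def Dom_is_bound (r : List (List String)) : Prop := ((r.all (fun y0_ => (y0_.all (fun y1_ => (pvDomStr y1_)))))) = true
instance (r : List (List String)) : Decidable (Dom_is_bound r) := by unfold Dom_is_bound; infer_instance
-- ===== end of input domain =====

-- B replaces A's full-scan loop with a mutable flag by a short-circuiting recursive chain-follower (different decomposition, same cost).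
-- B-side helper, defined before either port: follow the chain from `cur`, short-circuiting at the
-- first broken link; at the end of the body compare the carried endpoint with y. (Used only by is_bound_alt.)
def chained (y : String) : String → List (List String) → Bool
  | cur, [] => cur == y
  | cur, (v_a :: v_b :: _ :: _ :: []) :: rest' => v_a == cur && chained y v_b rest'
  | _, _ :: _ => false  -- unreachable under Pre_ (Python: unpacking ValueError)

-- ===== PORT A =====
-- (B's helper `chained` is defined first, before both ports, under PORT B's comment below.)
-- A scans the whole body keeping a flag `bound` and the running endpoint `v_f`, then checks v_f against y.
def is_bound (r : List (List String)) : Bool :=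
  match r with
  | [] => false  -- unreachable under Pre_ (Python: IndexError on r[0])
  | head :: body =>
    match PySem.List.pyGet? head 1, PySem.List.pyGet? head 0 with
    | some x, some y =>
      let st := body.foldl (fun (st : Bool × String) row =>
        match row with
        | [v_a, v_b, _, _] => ((if v_a ≠ st.2 then false else st.1), v_b)
        | _ => st  -- unreachable under Pre_ (Python: unpacking error)
        ) (true, x)
      if st.2 ≠ y then false else st.1
    | _, _ => false  -- unreachable under Pre_ (IndexError on head[1]/head[0])

-- ===== PORT B =====
def is_bound_alt (r : List (List String)) : Bool :=
  -- r[0], head[0], head[1] via pyGet? (none = IndexError, unreachable under Pre_, yields false); body = r[1:]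
  ((PySem.List.pyGet? r 0).bind (fun head =>
    (PySem.List.pyGet? head 0).bind (fun y =>
      (PySem.List.pyGet? head 1).map (fun x =>
        chained y x (PySem.List.slice r (some 1) none))))).getD false

-- ===== PRECONDITION & SPEC =====
-- Pre_ excludes exactly the inputs where A raises: empty r (IndexError on r[0]),
-- a head with fewer than 2 entries (IndexError), or a body row not of length 4 (unpacking ValueError).
def Pre_is_bound (r : List (List String)) : Prop :=
  r ≠ [] ∧ 2 ≤ (r.headD []).length ∧ ∀ row ∈ r.tail, row.length = 4
instance (r : List (List String)) : Decidable (Pre_is_bound r) := by unfold Pre_is_bound; infer_instance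
def pvWitness_is_bound : List (List String) := [["c", "a"], ["a", "b", "p", "d"], ["b", "c", "q", "d"]]
def Spec_is_bound (r : List (List String)) (out : Bool) : Prop := out = is_bound_alt r
instance (r : List (List String)) (out : Bool) : Decidable (Spec_is_bound r out) := by unfold Spec_is_bound; infer_instance

-- ===== CLAIM (what is proved, stated in full; the proofs are below) =====
def Claim_equal_is_bound : Prop := ∀ (r : List (List String)), Dom_is_bound r → Pre_is_bound r → Spec_is_bound r (is_bound r)

-- ===== LEMMAS AND PROOFS =====

-- Loop invariant: A's fold-then-final-check equals `bound && chained y x body`,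
-- generalized over the initial flag `bound` and running endpoint `x`.
theorem is_bound_loop_eq (body : List (List String)) (x y : String) (bound : Bool)
    (h : ∀ row ∈ body, row.length = 4) :
    (let st := body.foldl (fun (st : Bool × String) row =>
        match row with
        | [v_a, v_b, _, _] => ((if v_a ≠ st.2 then false else st.1), v_b)
        | _ => st) (bound, x)
     if st.2 ≠ y then false else st.1)
    = (bound && chained y x body) := by
  induction body generalizing x bound with
  | nil =>
    simp only [List.foldl, chained]
    by_cases hxy : x = y
    · subst hxy; simp
    · simp [hxy]
  | cons row rest ih =>
    have hr : row.length = 4 := h row (by simp)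
    match row, hr with
    | [v_a, v_b, p, d], _ =>
      have hrest : ∀ r ∈ rest, r.length = 4 := fun r hrm => h r (by simp [hrm])
      simp only [List.foldl, chained]
      rw [ih v_b (if v_a ≠ x then false else bound) hrest]
      by_cases hva : v_a = x
      · subst hva; simp
      · simp [hva]

-- ===== VERDICT (by name: the statement is the Claim_ definition above) =====
theorem is_bound_spec : Claim_equal_is_bound := by
  intro r _ hpre
  obtain ⟨hne, hlen, hrows⟩ := hpre
  match r, hne with
  | head :: body, _ =>
    simp only [List.headD] at hlen
    match head, hlen with
    | a :: c :: t, _ =>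
      have h1 : PySem.List.pyGet? (a :: c :: t) 1 = some c := by
        simp [PySem.List.pyGet?, PySem.List.pyIdx?]
      unfold Spec_is_bound is_bound is_bound_alt
      simp only [h1, PySem.List.pyGet?_zero_cons, PySem.List.slice_from_one, List.tail_cons]
      rw [is_bound_loop_eq body c a true (by simpa using hrows)]
      simp
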